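-- pv_equiv track=rewrite | github.com/hliza84/Week-lessons | Week7/test2.py | firstPlace
-- ===== SOURCE A (Python) =====
-- def firstPlace(str):
--     if not str:
--         return "No road available"
--     cars = []
--     for i in str:
--         if i != '=':
--             cars.append(i)
--     if not cars:
--         return "No car available"
--     return cars[-1]
-- ===== SOURCE B (Python) =====
-- def firstPlace(str):
--     if not str:
--         return "No road available"
--     for ch in reversed(str):
--         if ch != '=':
--             return ch
--     return "No car available"
-- ===== Notes on version B (the rewrite author's own statement) =====
-- stated objective: faster
-- what changed: Instead of accumulating every non-separator character into a list and taking its last element, B scans the string backwards and returns the first non-separator character it meets, stopping early.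
import Mathlib
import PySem

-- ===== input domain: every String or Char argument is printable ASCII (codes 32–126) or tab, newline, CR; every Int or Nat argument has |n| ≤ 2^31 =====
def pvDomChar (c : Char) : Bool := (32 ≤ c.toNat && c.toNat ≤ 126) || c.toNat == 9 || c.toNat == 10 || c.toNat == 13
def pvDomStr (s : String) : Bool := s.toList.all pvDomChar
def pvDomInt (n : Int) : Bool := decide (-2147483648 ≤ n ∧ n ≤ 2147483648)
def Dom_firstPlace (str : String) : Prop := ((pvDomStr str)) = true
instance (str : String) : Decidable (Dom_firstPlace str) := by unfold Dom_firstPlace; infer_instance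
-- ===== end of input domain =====

-- B scans the string backwards and returns the first non-'=' character, with early exit,
-- instead of A's collect-all-non-'='-characters-then-take-last (alternative decomposition).

-- ===== PORT A =====
def firstPlace (str : String) : String :=
  if str = "" then "No road available"
  else
    -- cars = []; for i in str: if i != '=': cars.append(i)
    let cars : List Char :=
      str.toList.foldl (fun acc i => if i ≠ '=' then acc ++ [i] else acc) []
    if cars = [] then "No car available"
    else
      match PySem.List.pyGet? cars (-1) with   -- cars[-1]; cars ≠ [] so this is some
      | some c => String.ofList [c]
      | none => ""   -- unreachable under the guard above

-- ===== PORT B =====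
-- 'for ch in reversed(str): if ch != '=': return ch' as structural recursion on the reversed char list
def pvScanBack : List Char → Option Char
  | [] => none
  | c :: t => if c ≠ '=' then some c else pvScanBack t

def firstPlace_alt (str : String) : String :=
  if str = "" then "No road available"
  else
    match pvScanBack str.toList.reverse with
    | some c => String.ofList [c]
    | none => "No car available"

-- ===== PRECONDITION & SPEC =====
def Spec_firstPlace (str : String) (out : String) : Prop := out = firstPlace_alt str
instance (str : String) (out : String) : Decidable (Spec_firstPlace str out) := by unfold Spec_firstPlace; infer_instance

-- ===== CLAIM =====
def Claim_equal_firstPlace : Prop := ∀ (str : String), Dom_firstPlace str → Spec_firstPlace str (firstPlace str)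

-- ===== LEMMAS AND PROOFS =====

theorem pvScanBack_eq_head_filter (r : List Char) :
    pvScanBack r = (r.filter (fun i => decide (i ≠ '='))).head? := by
  induction r with
  | nil => simp [pvScanBack]
  | cons a t ih =>
    by_cases ha : a = '='
    · simpa [pvScanBack, ha] using ih
    · simp [pvScanBack, ha]

theorem pv_cars_getLast (l : List Char) :
    (l.foldl (fun acc i => if i ≠ '=' then acc ++ [i] else acc) []).getLast? =
      pvScanBack l.reverse := by
  have hf : l.foldl (fun acc i => if i ≠ '=' then acc ++ [i] else acc) [] =
      l.filter (fun i => decide (i ≠ '=')) := by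
    have := PySem.List.foldl_append_if (fun i => decide (i ≠ '=')) (fun i => i) l []
    simpa [decide_eq_true_eq] using this
  rw [hf, pvScanBack_eq_head_filter, List.filter_reverse, List.head?_reverse]

-- ===== VERDICT =====
theorem firstPlace_spec : Claim_equal_firstPlace := by
  intro str _
  unfold Spec_firstPlace firstPlace firstPlace_alt
  by_cases hs : str = ""
  · simp [hs]
  · simp only [hs, if_false]
    have h := pv_cars_getLast str.toList
    simp only [PySem.List.pyGet?_neg_one]
    by_cases hc : str.toList.foldl (fun acc i => if i ≠ '=' then acc ++ [i] else acc) [] = []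
    · rw [if_pos hc]
      have : pvScanBack str.toList.reverse = none := by
        rw [← h, hc]; rfl
      rw [this]
    · rw [if_neg hc, ← h]
      obtain ⟨c, hcv⟩ := List.getLast?_isSome.mpr hc |> Option.isSome_iff_exists.mp
      rw [hcv]
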